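-- pv_equiv track=rewrite | github.com/molnar780/Neuman-verseny | Neumann/2022/1.ford/3 fel/3,a.py | calc_line_x
-- ===== SOURCE A (Python) =====
-- def calc_line_x(current_line, x):
--     next_line=[]
--     for i in range(x-1):
--         for j in range(len(current_line)-1):
--             next_line.append(current_line[j] + current_line[j+1])
--         current_line=next_line
--         next_line=[]
--     return current_line
-- ===== SOURCE B (Python) =====
-- def calc_line_x(current_line, x):
--     n = x - 1
--     if n <= 0:
--         return current_line
--     L = len(current_line)
--     if n >= L:
--         return []
--     coef = [1]
--     c = 1
--     for k in range(n):
--         c = c * (n - k) // (k + 1)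
--         coef.append(c)
--     return [sum(coef[k] * current_line[i + k] for k in range(n + 1))
--             for i in range(L - n)]
-- ===== Notes on version B (the rewrite author's own statement) =====
-- stated objective: alternative
-- what changed: Replaces A's x-1 repeated adjacent-sum passes (rebuilding the list each pass) by a single binomial-weighted convolution: precompute C(n,0..n) by a running product and emit each output element directly.
import Mathlib
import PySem

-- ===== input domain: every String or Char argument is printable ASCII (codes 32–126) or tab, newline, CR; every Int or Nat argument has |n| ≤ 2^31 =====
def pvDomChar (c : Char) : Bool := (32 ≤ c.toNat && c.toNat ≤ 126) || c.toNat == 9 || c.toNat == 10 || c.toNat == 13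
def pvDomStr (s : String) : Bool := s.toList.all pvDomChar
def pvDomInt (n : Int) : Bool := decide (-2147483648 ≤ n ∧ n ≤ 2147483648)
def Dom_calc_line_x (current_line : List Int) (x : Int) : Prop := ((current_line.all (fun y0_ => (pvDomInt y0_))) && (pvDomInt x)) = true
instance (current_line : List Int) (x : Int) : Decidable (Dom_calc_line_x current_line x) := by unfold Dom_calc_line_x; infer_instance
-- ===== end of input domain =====

-- B replaces A's repeated adjacent-sum passes by one binomial-weighted convolution (objective: alternative algorithm).

-- ===== PORT A =====
-- one pass of A's inner loop: append current_line[j] + current_line[j+1] for j in range(len-1)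
def calc_line_x_step (cl : List Int) : List Int :=
  (List.range (cl.length - 1)).foldl (fun nl j => nl ++ [cl.getD j 0 + cl.getD (j + 1) 0]) []

def calc_line_x (current_line : List Int) (x : Int) : List Int :=
  (List.range (x - 1).toNat).foldl (fun cl _ => calc_line_x_step cl) current_line

-- ===== PORT B =====
def calc_line_x_alt (current_line : List Int) (x : Int) : List Int :=
  let n := x - 1
  if n ≤ 0 then current_line
  else if (current_line.length : Int) ≤ n then []
  else
    let nn := n.toNat
    let coefc : List Int × Int :=
      (List.range nn).foldl
        (fun (p : List Int × Int) (k : Nat) =>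
          let c := PySem.Int.floordiv (p.2 * (n - (k : Int))) ((k : Int) + 1)
          (p.1 ++ [c], c))
        ([1], 1)
    (List.range (current_line.length - nn)).map (fun i =>
      (List.range (nn + 1)).foldl (fun (s : Int) (k : Nat) => s + coefc.1.getD k 0 * current_line.getD (i + k) 0) 0)

-- ===== PRECONDITION & SPEC =====
def Spec_calc_line_x (current_line : List Int) (x : Int) (out : List Int) : Prop := out = calc_line_x_alt current_line x
instance (current_line : List Int) (x : Int) (out : List Int) : Decidable (Spec_calc_line_x current_line x out) := by unfold Spec_calc_line_x; infer_instance

-- ===== CLAIM (what is proved, stated in full; the proofs are below) =====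
def Claim_equal_calc_line_x : Prop := ∀ (current_line : List Int) (x : Int), Dom_calc_line_x current_line x → Spec_calc_line_x current_line x (calc_line_x current_line x)

-- ===== LEMMAS AND PROOFS =====

-- binomial-weighted window sum at position i, window size n+1
def pvConv (cl : List Int) (n i : Nat) : Int :=
  ∑ k ∈ Finset.range (n + 1), ((n.choose k : Int)) * cl.getD (i + k) 0

def pvConvList (cl : List Int) (n : Nat) : List Int :=
  (List.range (cl.length - n)).map (pvConv cl n)

theorem pv_foldl_append_map {α β : Type} (g : α → β) :
    ∀ (l : List α) (acc : List β),
      l.foldl (fun nl j => nl ++ [g j]) acc = acc ++ l.map g := by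
  intro l
  induction l with
  | nil => simp
  | cons a t ih => intro acc; simp [List.foldl, ih, List.append_assoc]

theorem pv_getD_map_range (g : Nat → Int) (m j : Nat) (hj : j < m) :
    ((List.range m).map g).getD j 0 = g j := by
  simp [List.getD, List.getElem?_map, List.getElem?_range hj]

theorem pv_step_map (cl : List Int) :
    calc_line_x_step cl =
      (List.range (cl.length - 1)).map (fun j => cl.getD j 0 + cl.getD (j + 1) 0) := by
  unfold calc_line_x_step
  rw [pv_foldl_append_map]
  simp

theorem pv_choose_top (n : Nat) : (n.choose (n + 1) : Int) = 0 := by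
  simp

-- Pascal's rule for the window sums
theorem pv_conv_pascal (cl : List Int) (n i : Nat) :
    pvConv cl (n + 1) i = pvConv cl n i + pvConv cl n (i + 1) := by
  unfold pvConv
  rw [Finset.sum_range_succ' (fun k => ((n + 1).choose k : Int) * cl.getD (i + k) 0) (n + 1)]
  have hsplit : ∀ k ∈ Finset.range (n + 1),
      (((n + 1).choose (k + 1) : Int)) * cl.getD (i + (k + 1)) 0
        = (n.choose k : Int) * cl.getD (i + 1 + k) 0
          + (n.choose (k + 1) : Int) * cl.getD (i + (k + 1)) 0 := by
    intro k _
    have : (n + 1).choose (k + 1) = n.choose k + n.choose (k + 1) := Nat.choose_succ_succ n k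
    rw [this]
    push_cast
    ring_nf
  rw [Finset.sum_congr rfl hsplit, Finset.sum_add_distrib]
  have h1 : (∑ k ∈ Finset.range (n + 1), (n.choose (k + 1) : Int) * cl.getD (i + (k + 1)) 0)
      + ((n + 1).choose 0 : Int) * cl.getD (i + 0) 0
      = pvConv cl n i := by
    unfold pvConv
    rw [Finset.sum_range_succ (fun k => (n.choose (k + 1) : Int) * cl.getD (i + (k + 1)) 0) n,
      pv_choose_top]
    rw [Finset.sum_range_succ' (fun k => (n.choose k : Int) * cl.getD (i + k) 0) n]
    simp
  have h2 : (∑ k ∈ Finset.range (n + 1), (n.choose k : Int) * cl.getD (i + 1 + k) 0)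
      = pvConv cl n (i + 1) := rfl
  unfold pvConv at h1; rw [h2]; linarith [h1]

theorem pv_step_conv (cl : List Int) (n : Nat) :
    calc_line_x_step (pvConvList cl n) = pvConvList cl (n + 1) := by
  rw [pv_step_map]
  have hlen : (pvConvList cl n).length = cl.length - n := by simp [pvConvList]
  rw [hlen]
  have hidx : cl.length - n - 1 = cl.length - (n + 1) := by omega
  rw [hidx]
  unfold pvConvList
  apply List.map_congr_left
  intro j hj
  have hj' : j < cl.length - (n + 1) := by simpa using List.mem_range.mp hj
  have h1 : j < cl.length - n := by omega
  have h2 : j + 1 < cl.length - n := by omega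
  rw [pv_getD_map_range _ _ _ h1, pv_getD_map_range _ _ _ h2, ← pv_conv_pascal]

theorem pv_map_getD (cl : List Int) :
    (List.range cl.length).map (fun i => cl.getD i 0) = cl := by
  apply List.ext_getElem
  · simp
  · intro i h1 h2
    simp [List.getD_eq_getElem?_getD, List.getElem?_eq_getElem h2]

theorem pv_conv_zero (cl : List Int) : pvConvList cl 0 = cl := by
  unfold pvConvList pvConv
  simpa using pv_map_getD cl

theorem pv_iterate (cl : List Int) : ∀ n, calc_line_x_step^[n] cl = pvConvList cl n := by
  intro n
  induction n with
  | zero => simpa using (pv_conv_zero cl).symm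
  | succ m ih => rw [Function.iterate_succ_apply', ih, pv_step_conv]

theorem pv_foldl_iter : ∀ (m : Nat) (cl : List Int),
    (List.range m).foldl (fun c _ => calc_line_x_step c) cl = calc_line_x_step^[m] cl := by
  intro m
  induction m with
  | zero => intro cl; simp
  | succ k ih =>
      intro cl
      rw [List.range_succ, List.foldl_append, ih, Function.iterate_succ_apply']
      simp

theorem pv_A_conv (cl : List Int) (x : Int) :
    calc_line_x cl x = pvConvList cl (x - 1).toNat := by
  unfold calc_line_x
  rw [pv_foldl_iter, pv_iterate]

theorem pv_foldl_sum (g : Nat → Int) : ∀ m : Nat,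
    (List.range m).foldl (fun s k => s + g k) 0 = ∑ k ∈ Finset.range m, g k := by
  intro m
  induction m with
  | zero => simp
  | succ p ih =>
      rw [List.range_succ, List.foldl_append, ih]
      simp [Finset.sum_range_succ]

theorem pv_coef (N : Nat) : ∀ m : Nat, m ≤ N →
    (List.range m).foldl
      (fun (p : List Int × Int) (k : Nat) =>
        (p.1 ++ [PySem.Int.floordiv (p.2 * ((N : Int) - (k : Int))) ((k : Int) + 1)],
         PySem.Int.floordiv (p.2 * ((N : Int) - (k : Int))) ((k : Int) + 1)))
      ([1], 1)
    = ((List.range (m + 1)).map (fun k => (N.choose k : Int)), (N.choose m : Int)) := by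
  intro m
  induction m with
  | zero => intro _; simp
  | succ p ih =>
      intro hm
      rw [List.range_succ, List.foldl_append, ih (by omega)]
      simp only [List.foldl]
      have hsub : (N : Int) - (p : Int) = ((N - p : Nat) : Int) := by
        have : p ≤ N := by omega
        omega
      have hdiv : PySem.Int.floordiv ((N.choose p : Int) * ((N : Int) - (p : Int))) ((p : Int) + 1)
          = (N.choose (p + 1) : Int) := by
        rw [hsub]
        have hmul : (N.choose p : Int) * ((N - p : Nat) : Int)
            = ((N.choose (p + 1) * (p + 1) : Nat) : Int) := by
          exact_mod_cast (Nat.choose_succ_right_eq N p).symm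
        rw [hmul]
        have hcast : ((p : Int) + 1) = (((p + 1 : Nat)) : Int) := by push_cast; ring
        rw [hcast, PySem.Int.floordiv_natCast]
        rw [Nat.mul_div_cancel _ (by omega)]
      rw [hdiv]
      rw [show List.range (p + 1 + 1) = List.range (p + 1) ++ [p + 1] from List.range_succ,
        List.map_append]
      simp

theorem pv_B_conv (cl : List Int) (x : Int) :
    calc_line_x_alt cl x = pvConvList cl (x - 1).toNat := by
  simp only [calc_line_x_alt]
  split_ifs with h1 h2
  · have h0 : (x - 1).toNat = 0 := by omega
    rw [h0, pv_conv_zero]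
  · unfold pvConvList
    have h0 : cl.length - (x - 1).toNat = 0 := by omega
    rw [h0]
    simp
  · have hx : ((x - 1).toNat : Int) = x - 1 := Int.toNat_of_nonneg (by omega)
    rw [show (x - 1 : Int) = ((x - 1).toNat : Int) from hx.symm]
    simp only [Int.toNat_natCast]
    rw [pv_coef ((x - 1).toNat) ((x - 1).toNat) le_rfl]
    unfold pvConvList
    apply List.map_congr_left
    intro i _
    rw [pv_foldl_sum (fun k =>
      ((List.range ((x - 1).toNat + 1)).map (fun k => (((x - 1).toNat.choose k : Int)))).getD k 0
        * cl.getD (i + k) 0)]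
    unfold pvConv
    apply Finset.sum_congr rfl
    intro k hk
    rw [pv_getD_map_range _ _ _ (by simpa using Finset.mem_range.mp hk)]


-- ===== VERDICT (by name: the statement is the Claim_ definition above) =====
theorem calc_line_x_spec : Claim_equal_calc_line_x := by
  intro cl x _
  unfold Spec_calc_line_x
  rw [pv_A_conv, pv_B_conv]
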